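-- pv_equiv track=rewrite | github.com/colmeta/Proposal-generator | agents/coo_agent.py | _generate_feasibility_recommendations
-- ===== SOURCE A (Python) =====
-- from typing import Dict, Any, List, Optional
--
-- def _generate_feasibility_recommendations(risks: List[str]) -> List[str]:
--     """Generate feasibility recommendations"""
--     recommendations = []
--
--     for risk in risks:
--         if "insufficient" in risk.lower():
--             recommendations.append("Secure additional resources or reduce scope")
--         elif "timeline" in risk.lower():
--             recommendations.append("Extend timeline or increase resource allocation")
--         elif "efficiency" in risk.lower():
--             recommendations.append("Optimize processes to improve efficiency")
--         else:
--             recommendations.append(f"Mitigate: {risk}")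
--
--     return recommendations
-- ===== SOURCE B (Python) =====
-- def _generate_feasibility_recommendations(risks):
--     """Staged overwrite passes: start with defaults, then sweep the whole list
--     once per keyword in reverse priority order so the last (highest-priority)
--     matching pass wins."""
--     lows = [r.lower() for r in risks]
--     out = [f"Mitigate: {r}" for r in risks]
--     for kw, rec in [("efficiency", "Optimize processes to improve efficiency"),
--                     ("timeline", "Extend timeline or increase resource allocation"),
--                     ("insufficient", "Secure additional resources or reduce scope")]:
--         for i, low in enumerate(lows):
--             if kw in low:
--                 out[i] = rec
--     return out
-- ===== Notes on version B (the rewrite author's own statement) =====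
-- stated objective: alternative
-- what changed: Replaces the per-item if/elif first-match chain by staged whole-list overwrite passes: the output starts as all defaults and three keyword sweeps in reverse priority order overwrite matching positions, so the last write is the highest-priority match.
import Mathlib
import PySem

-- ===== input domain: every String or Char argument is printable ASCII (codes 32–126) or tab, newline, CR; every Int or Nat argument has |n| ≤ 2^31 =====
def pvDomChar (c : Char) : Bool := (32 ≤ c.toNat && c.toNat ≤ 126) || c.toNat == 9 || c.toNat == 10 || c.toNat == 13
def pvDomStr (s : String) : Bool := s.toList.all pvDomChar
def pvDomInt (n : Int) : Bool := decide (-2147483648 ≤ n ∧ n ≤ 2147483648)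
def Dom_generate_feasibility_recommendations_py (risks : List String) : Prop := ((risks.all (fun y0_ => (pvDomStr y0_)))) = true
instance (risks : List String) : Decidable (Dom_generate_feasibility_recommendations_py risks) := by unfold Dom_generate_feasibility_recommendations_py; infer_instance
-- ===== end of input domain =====

-- B replaces A's per-item if/elif chain by staged whole-list overwrite passes in
-- reverse priority order (objective: alternative, same cost).

-- ===== PORT A =====
def generate_feasibility_recommendations_py (risks : List String) : List String :=
  risks.foldl (fun recommendations risk =>
    if PySem.Str.isIn "insufficient" (PySem.Str.lower risk) then
      recommendations ++ ["Secure additional resources or reduce scope"]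
    else if PySem.Str.isIn "timeline" (PySem.Str.lower risk) then
      recommendations ++ ["Extend timeline or increase resource allocation"]
    else if PySem.Str.isIn "efficiency" (PySem.Str.lower risk) then
      recommendations ++ ["Optimize processes to improve efficiency"]
    else
      recommendations ++ [String.ofList ("Mitigate: ".toList ++ risk.toList)]) []

-- ===== PORT B =====
def pvPasses : List (String × String) :=
  [("efficiency", "Optimize processes to improve efficiency"),
   ("timeline", "Extend timeline or increase resource allocation"),
   ("insufficient", "Secure additional resources or reduce scope")]

-- one inner pass: 'for i, low in enumerate(lows): if kw in low: out[i] = rec'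
def pvOverwrite (kw rec : String) (lows out : List String) : List String :=
  List.zipWith (fun low o => if PySem.Str.isIn kw low then rec else o) lows out

def generate_feasibility_recommendations_py_alt (risks : List String) : List String :=
  let lows := risks.map PySem.Str.lower
  let out := risks.map (fun r => String.ofList ("Mitigate: ".toList ++ r.toList))
  pvPasses.foldl (fun out p => pvOverwrite p.1 p.2 lows out) out

-- ===== PRECONDITION & SPEC =====
def Spec_generate_feasibility_recommendations_py (risks : List String) (out : List String) : Prop := out = generate_feasibility_recommendations_py_alt risks
instance (risks : List String) (out : List String) : Decidable (Spec_generate_feasibility_recommendations_py risks out) := by unfold Spec_generate_feasibility_recommendations_py; infer_instance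

-- ===== CLAIM (what is proved, stated in full; the proofs are below) =====
def Claim_equal_generate_feasibility_recommendations_py : Prop := ∀ (risks : List String), Dom_generate_feasibility_recommendations_py risks → Spec_generate_feasibility_recommendations_py risks (generate_feasibility_recommendations_py risks)

-- ===== LEMMAS AND PROOFS =====

theorem pv_zipWith_map_map {α β γ δ : Type} (f : β → γ → δ) (u : α → β) (v : α → γ)
    (xs : List α) : List.zipWith f (xs.map u) (xs.map v) = xs.map (fun x => f (u x) (v x)) := by
  induction xs with
  | nil => rfl
  | cons a t ih => simp [ih]

-- ===== VERDICT (by name: the statement is the Claim_ definition above) =====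
theorem generate_feasibility_recommendations_py_spec : Claim_equal_generate_feasibility_recommendations_py := by
  intro risks _
  unfold Spec_generate_feasibility_recommendations_py
  unfold generate_feasibility_recommendations_py generate_feasibility_recommendations_py_alt
  simp only [pvPasses, List.foldl_cons, List.foldl_nil, pvOverwrite, pv_zipWith_map_map]
  have hbody : (fun (recommendations : List String) (risk : String) =>
      if PySem.Str.isIn "insufficient" (PySem.Str.lower risk) then
        recommendations ++ ["Secure additional resources or reduce scope"]
      else if PySem.Str.isIn "timeline" (PySem.Str.lower risk) then
        recommendations ++ ["Extend timeline or increase resource allocation"]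
      else if PySem.Str.isIn "efficiency" (PySem.Str.lower risk) then
        recommendations ++ ["Optimize processes to improve efficiency"]
      else
        recommendations ++ [String.ofList ("Mitigate: ".toList ++ risk.toList)])
      = fun acc risk => acc ++ [
          if PySem.Str.isIn "insufficient" (PySem.Str.lower risk) then
            "Secure additional resources or reduce scope"
          else if PySem.Str.isIn "timeline" (PySem.Str.lower risk) then
            "Extend timeline or increase resource allocation"
          else if PySem.Str.isIn "efficiency" (PySem.Str.lower risk) then
            "Optimize processes to improve efficiency"
          else String.ofList ("Mitigate: ".toList ++ risk.toList)] := by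
    funext acc risk
    split_ifs <;> rfl
  rw [hbody, PySem.List.foldl_append_singleton_eq_map]
  apply List.map_congr_left
  intro risk _
  split_ifs <;> rfl
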